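-- pv_equiv track=rewrite | github.com/romanyn36/DNA-searching-algorithms-pyqt6 | kmer.py | find_valid_pairs
-- ===== SOURCE A (Python) =====
-- def find_valid_pairs(suffix_arr, k):
--     valid_pairs = []
--     curr_count = 1
--     n = len(suffix_arr)
--     prev_suff = ""
--
--     # Iterate over the suffix array, keeping a current count
--     for i in range(n):
--         # Skip the current suffix if it has length < k
--         if len(suffix_arr[i]) < k:
--             if i != 0 and len(prev_suff) == k:
--                 valid_pairs.append((prev_suff, curr_count))
--                 curr_count = 1
--             prev_suff = suffix_arr[i]
--             continue
--
--         # Increment curr_count if the first k chars of prev_suff and current suffix are the same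
--         if prev_suff[:k] == suffix_arr[i][:k]:
--             curr_count += 1
--         else:
--             # Output valid pair when i != 0 and len(prev_suff) == k
--             if i != 0 and len(prev_suff) == k:
--                 valid_pairs.append((prev_suff, curr_count))
--                 curr_count = 1
--                 prev_suff = suffix_arr[i][:k]
--             else:
--                 prev_suff = suffix_arr[i][:k]
--                 continue
--
--         # Modify prev_suff to the current suffix
--         prev_suff = suffix_arr[i][:k]
--
--     # Add the last valid pair to the list
--     if len(prev_suff) == k:
--         valid_pairs.append((prev_suff, curr_count))
--
--     return valid_pairs
-- ===== SOURCE B (Python) =====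
-- def find_valid_pairs(suffix_arr, k):
--     # Staged passes with index arithmetic instead of streaming state:
--     # 1) key list, 2) run-start positions, 3) counts as differences of boundaries.
--     keys = [s[:k] if len(s) >= k else None for s in suffix_arr]
--     n = len(keys)
--     starts = [(i, cur) for i, (cur, prev) in enumerate(zip(keys, [None] + keys))
--               if i == 0 or cur != prev]
--     ends = [i for i, _ in starts[1:]] + [n]
--     return [(key, e - b) for (b, key), e in zip(starts, ends)
--             if key is not None and len(key) == k]
-- ===== Notes on version B (the rewrite author's own statement) =====
-- stated objective: alternative
-- what changed: Replaces A's single stateful loop (prev_suff/curr_count bookkeeping with interleaved branches and a trailing flush) by staged passes over immutable lists: a key list, a list of run-start positions obtained by comparing the key list with its own shift, and counts computed as differences of consecutive boundary indices.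
-- intended difference: For k=0 A returns [('', len(suffix_arr)+1)] (even [('', 1)] for the empty list) because the initial curr_count=1 also counts the phantom empty prev_suff, while B returns the true run count [('', len(suffix_arr))] (and [] for the empty list), which is the intended count of suffixes sharing the empty prefix. — e.g. on find_valid_pairs(["a"], 0): A returns [("", 2)], B returns [("", 1)]
import Mathlib
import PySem

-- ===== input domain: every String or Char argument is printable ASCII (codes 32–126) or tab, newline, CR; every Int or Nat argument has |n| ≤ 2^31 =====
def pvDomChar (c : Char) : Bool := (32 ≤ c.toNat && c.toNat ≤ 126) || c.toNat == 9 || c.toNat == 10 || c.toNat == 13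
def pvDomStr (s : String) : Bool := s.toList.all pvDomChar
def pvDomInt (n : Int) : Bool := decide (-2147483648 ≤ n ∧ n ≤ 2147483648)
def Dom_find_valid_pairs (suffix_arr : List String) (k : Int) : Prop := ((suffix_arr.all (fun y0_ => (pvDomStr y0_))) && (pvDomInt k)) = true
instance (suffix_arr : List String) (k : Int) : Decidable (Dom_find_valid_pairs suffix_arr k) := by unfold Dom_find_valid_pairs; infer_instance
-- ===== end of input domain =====

-- B replaces A's stateful prev_suff/curr_count loop by staged passes: a key list, run-start
-- positions found by comparing the key list with its own shift, and counts as differences of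
-- consecutive boundary indices; objective: alternative (same cost, no streaming state).

-- ===== PORT A =====
-- loop state: (valid_pairs, curr_count, prev_suff, i)
def aStep (k : Int) (st : List (String × Int) × Int × String × Int) (s : String) :
    List (String × Int) × Int × String × Int :=
  if PySem.Str.len s < k then
    if st.2.2.2 ≠ 0 ∧ PySem.Str.len st.2.2.1 = k then (st.1 ++ [(st.2.2.1, st.2.1)], 1, s, st.2.2.2 + 1)
    else (st.1, st.2.1, s, st.2.2.2 + 1)
  else if PySem.Str.slice st.2.2.1 none (some k) = PySem.Str.slice s none (some k) then
    (st.1, st.2.1 + 1, PySem.Str.slice s none (some k), st.2.2.2 + 1)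
  else if st.2.2.2 ≠ 0 ∧ PySem.Str.len st.2.2.1 = k then
    (st.1 ++ [(st.2.2.1, st.2.1)], 1, PySem.Str.slice s none (some k), st.2.2.2 + 1)
  else (st.1, st.2.1, PySem.Str.slice s none (some k), st.2.2.2 + 1)

-- the final 'if len(prev_suff) == k: valid_pairs.append(...)'
def aFinal (k : Int) (st : List (String × Int) × Int × String × Int) : List (String × Int) :=
  if PySem.Str.len st.2.2.1 = k then st.1 ++ [(st.2.2.1, st.2.1)] else st.1

def find_valid_pairs (suffix_arr : List String) (k : Int) : List (String × Int) :=
  aFinal k (suffix_arr.foldl (aStep k) ([], 1, "", 0))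

-- ===== PORT B =====
-- 's[:k] if len(s) >= k else None'
def bKey (k : Int) (s : String) : Option String :=
  if k ≤ PySem.Str.len s then some (PySem.Str.slice s none (some k)) else none

def find_valid_pairs_alt (suffix_arr : List String) (k : Int) : List (String × Int) :=
  -- keys = [s[:k] if len(s) >= k else None for s in suffix_arr]
  let keys := suffix_arr.map (bKey k)
  -- n = len(keys)
  let n : Int := keys.length
  -- starts = [(i, cur) for i, (cur, prev) in enumerate(zip(keys, [None] + keys)) if i == 0 or cur != prev]
  let starts := ((PySem.List.enumerate (keys.zip ((none : Option String) :: keys))).filter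
      (fun p => p.1 == 0 || !(p.2.1 == p.2.2))).map (fun p => (p.1, p.2.1))
  -- ends = [i for i, _ in starts[1:]] + [n]
  let ends := (starts.drop 1).map (fun p => p.1) ++ [n]
  -- [(key, e - b) for (b, key), e in zip(starts, ends) if key is not None and len(key) == k]
  (starts.zip ends).foldl
    (fun acc q =>
      match q.1.2 with
      | some key => if PySem.Str.len key = k then acc ++ [(key, q.2 - q.1.1)] else acc
      | none => acc) []

-- ===== PRECONDITION & SPEC =====
-- For k=0 A returns [('', n+1)] for a list of n suffixes (even [('', 1)] for the empty list),
-- because the initial curr_count=1 also counts the phantom empty prev_suff; B returns the true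
-- run count [('', n)] ([] for the empty list), the intended count of suffixes sharing prefix ''.
def D_find_valid_pairs (suffix_arr : List String) (k : Int) : Prop := k = 0
instance (suffix_arr : List String) (k : Int) : Decidable (D_find_valid_pairs suffix_arr k) := by
  unfold D_find_valid_pairs; infer_instance

def Spec_find_valid_pairs (suffix_arr : List String) (k : Int) (out : List (String × Int)) : Prop :=
  ¬ D_find_valid_pairs suffix_arr k → out = find_valid_pairs_alt suffix_arr k
instance (suffix_arr : List String) (k : Int) (out : List (String × Int)) : Decidable (Spec_find_valid_pairs suffix_arr k out) := by unfold Spec_find_valid_pairs; infer_instance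

def pvDiffWitness_find_valid_pairs : List String × Int := (["a"], 0)
def pvDiffWitnessOut_find_valid_pairs : (List (String × Int)) × (List (String × Int)) :=
  ([("", 2)], [("", 1)])

-- ===== CLAIM (what is proved, stated in full; the proofs are below) =====
def Claim_unchanged_find_valid_pairs : Prop := ∀ (suffix_arr : List String) (k : Int), Dom_find_valid_pairs suffix_arr k → Spec_find_valid_pairs suffix_arr k (find_valid_pairs suffix_arr k)
def Claim_changed_find_valid_pairs : Prop := Dom_find_valid_pairs (pvDiffWitness_find_valid_pairs.1) (pvDiffWitness_find_valid_pairs.2) ∧ D_find_valid_pairs (pvDiffWitness_find_valid_pairs.1) (pvDiffWitness_find_valid_pairs.2) ∧ find_valid_pairs (pvDiffWitness_find_valid_pairs.1) (pvDiffWitness_find_valid_pairs.2) = pvDiffWitnessOut_find_valid_pairs.1 ∧ find_valid_pairs_alt (pvDiffWitness_find_valid_pairs.1) (pvDiffWitness_find_valid_pairs.2) = pvDiffWitnessOut_find_valid_pairs.2 ∧ pvDiffWitnessOut_find_valid_pairs.1 ≠ pvDiffWitnessOut_find_valid_pairs.2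
def Claim_exact_find_valid_pairs : Prop := ∀ (suffix_arr : List String) (k : Int), Dom_find_valid_pairs suffix_arr k → D_find_valid_pairs suffix_arr k → find_valid_pairs suffix_arr k ≠ find_valid_pairs_alt suffix_arr k

-- ===== LEMMAS AND PROOFS =====

-- basic string facts
theorem pvLenEq (s : String) : PySem.Str.len s = (s.length : Int) := by
  simp [PySem.Str.len]

theorem pvLenNonneg (s : String) : 0 ≤ PySem.Str.len s := by
  rw [pvLenEq]; exact_mod_cast Nat.zero_le _

theorem pvSliceToList (s : String) (k : Int) (hk : 0 ≤ k) :
    (PySem.Str.slice s none (some k)).toList = s.toList.take k.toNat := by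
  rw [PySem.Str.toList_slice]
  simp [PySem.Chars.slice_eq_listSlice, PySem.List.slice_to s.toList hk]

theorem pvSliceLen (s : String) (k : Int) (hk : 0 ≤ k) (h : k ≤ PySem.Str.len s) :
    PySem.Str.len (PySem.Str.slice s none (some k)) = k := by
  rw [pvLenEq] at h ⊢
  rw [← String.length_toList, pvSliceToList s k hk]
  simp only [List.length_take, String.length_toList]
  omega

theorem pvSliceAll (s : String) (k : Int) (hk : 0 ≤ k) (h : PySem.Str.len s ≤ k) :
    PySem.Str.slice s none (some k) = s := by
  rw [pvLenEq] at h
  rw [← String.toList_inj, pvSliceToList s k hk]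
  exact List.take_of_length_le (by rw [String.length_toList]; omega)

theorem pvNeOfLenNe (a b : String) (h : PySem.Str.len a ≠ PySem.Str.len b) : a ≠ b := by
  intro hab; exact h (by rw [hab])

-- reference form both sides are reduced to: runs of equal keys with their lengths
def bRun (κ : Option String) (c : Int) : List (Option String) → List (Option String × Int)
  | [] => [(κ, c)]
  | x :: xs => if x == κ then bRun κ (c + 1) xs else (κ, c) :: bRun x 1 xs

def bGroups : List (Option String) → List (Option String × Int)
  | [] => []
  | x :: xs => bRun x 1 xs

-- emit the valid pairs from a list of groups
def emitR (k : Int) : List (Option String × Int) → List (String × Int)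
  | [] => []
  | (some p, c) :: L => if PySem.Str.len p = k then (p, c) :: emitR k L else emitR k L
  | (none, _) :: L => emitR k L

theorem bGroups_cons (x : Option String) (xs : List (Option String)) :
    bGroups (x :: xs) = bRun x 1 xs := rfl

theorem bRun_pos (κ : Option String) (c : Int) (x : Option String)
    (xs : List (Option String)) (h : x = κ) :
    bRun κ c (x :: xs) = bRun κ (c + 1) xs := by
  simp [bRun, h]

theorem bRun_neg (κ : Option String) (c : Int) (x : Option String)
    (xs : List (Option String)) (h : x ≠ κ) :
    bRun κ c (x :: xs) = (κ, c) :: bRun x 1 xs := by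
  simp [bRun, h]

theorem bRun_const (L : List (Option String)) :
    ∀ (κ : Option String) (c : Int), (∀ y ∈ L, y = κ) →
      bRun κ c L = [(κ, c + (L.length : Int))] := by
  induction L with
  | nil => intro κ c _; simp [bRun]
  | cons x xs ih =>
      intro κ c h
      have hx : x = κ := h x (by simp)
      rw [bRun_pos κ c x xs hx, ih κ (c + 1) (fun y hy => h y (by simp [hy]))]
      simp
      push_cast
      ring

-- ===== B-side: the boundary-index passes compute the run groups =====

-- recursive characterisation of B's 'starts' pass (threading the previous key)
def sList (prev : Option String) (i : Int) : List (Option String) → List (Int × Option String)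
  | [] => []
  | x :: xs => if i == 0 || !(x == prev) then (i, x) :: sList x (i + 1) xs else sList x (i + 1) xs

theorem sList_eq (K : List (Option String)) : ∀ (prev : Option String) (i : Int),
    ((PySem.List.enumerate (K.zip (prev :: K)) i).filter
        (fun p => p.1 == 0 || !(p.2.1 == p.2.2))).map (fun p => (p.1, p.2.1))
      = sList prev i K := by
  induction K with
  | nil => intro prev i; simp [sList, PySem.List.enumerate]
  | cons x xs ih =>
      intro prev i
      rw [List.zip_cons_cons, PySem.List.enumerate_cons, List.filter_cons]
      by_cases h : (i == 0 || !(x == prev)) = true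
      · rw [if_pos h, List.map_cons, ih x (i + 1)]
        simp only [sList, if_pos h]
      · rw [if_neg h, ih x (i + 1)]
        simp only [sList, if_neg h]

-- turn boundary positions into (key, width) groups; n is the total length
def groupsOf (n : Int) : List (Int × Option String) → List (Option String × Int)
  | [] => []
  | [(b, κ)] => [(κ, n - b)]
  | (b, κ) :: (b', κ') :: rest => (κ, b' - b) :: groupsOf n ((b', κ') :: rest)

-- B's zip-with-ends fold equals emitting from the groups
theorem pvZip (k n : Int) : ∀ (S : List (Int × Option String)) (acc : List (String × Int)),
    (S.zip ((S.drop 1).map (fun p => p.1) ++ [n])).foldl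
      (fun acc q =>
        match q.1.2 with
        | some key => if PySem.Str.len key = k then acc ++ [(key, q.2 - q.1.1)] else acc
        | none => acc) acc
    = acc ++ emitR k (groupsOf n S) := by
  intro S
  induction S with
  | nil => intro acc; simp [groupsOf, emitR]
  | cons hd tl ih =>
      intro acc
      obtain ⟨b, κ⟩ := hd
      cases tl with
      | nil =>
          cases κ with
          | none => simp [groupsOf, emitR]
          | some p =>
              simp only [List.drop_one, List.tail_cons, List.map_nil, List.nil_append,
                List.zip_cons_cons, List.zip_nil_right, List.foldl_cons, List.foldl_nil,
                groupsOf, emitR]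
              split_ifs <;> simp [emitR]
      | cons hd2 tl2 =>
          obtain ⟨b', κ'⟩ := hd2
          simp only [List.drop_one, List.tail_cons] at ih
          have hgroups : groupsOf n ((b, κ) :: (b', κ') :: tl2) =
              (κ, b' - b) :: groupsOf n ((b', κ') :: tl2) := rfl
          simp only [List.drop_one, List.tail_cons, List.map_cons, List.cons_append,
            List.zip_cons_cons, List.foldl_cons, hgroups]
          cases κ with
          | none => rw [ih]; simp [emitR]
          | some p =>
              rw [ih]
              by_cases h : ((p.length : Int) = k) <;> simp [emitR, pvLenEq, h]

-- the boundary positions determine exactly the run groups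
theorem pvGroups (K : List (Option String)) : ∀ (κ : Option String) (b i : Int), 1 ≤ i →
    groupsOf (i + (K.length : Int)) ((b, κ) :: sList κ i K) = bRun κ (i - b) K := by
  induction K with
  | nil => intro κ b i _; simp [sList, groupsOf, bRun]
  | cons x xs ih =>
      intro κ b i hi
      have hi0 : (i == 0) = false := by simp; omega
      have hn : i + ((x :: xs).length : Int) = (i + 1) + (xs.length : Int) := by
        simp [List.length_cons]; push_cast; ring
      by_cases hx : x = κ
      · subst hx
        have hs : sList x i (x :: xs) = sList x (i + 1) xs := by
          simp [sList, hi0]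
        rw [hs, hn, ih x b (i + 1) (by omega), bRun_pos x (i - b) x xs rfl]
        have : i + 1 - b = i - b + 1 := by ring
        rw [this]
      · have hs : sList κ i (x :: xs) = (i, x) :: sList x (i + 1) xs := by
          simp [sList, hi0, hx]
        rw [hs]
        have hgroups : groupsOf (i + ((x :: xs).length : Int))
            ((b, κ) :: (i, x) :: sList x (i + 1) xs) =
            (κ, i - b) :: groupsOf (i + ((x :: xs).length : Int)) ((i, x) :: sList x (i + 1) xs) := rfl
        rw [hgroups, hn, ih x i (i + 1) (by omega), bRun_neg κ (i - b) x xs hx]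
        have : i + 1 - i = 1 := by ring
        rw [this]

-- B computes emitR of the run groups of the key list
theorem alt_eq (xs : List String) (k : Int) :
    find_valid_pairs_alt xs k = emitR k (bGroups (xs.map (bKey k))) := by
  unfold find_valid_pairs_alt
  dsimp only
  rw [sList_eq (xs.map (bKey k)) none 0]
  cases hK : xs.map (bKey k) with
  | nil => simp [sList, bGroups, emitR, groupsOf, pvZip k ((List.length (α := Option String) []) : Int) [] []]
  | cons x K' =>
      have hs : sList none 0 (x :: K') = (0, x) :: sList x 1 K' := by
        simp [sList]
      rw [hs, pvZip k (((x :: K').length : Nat) : Int) ((0, x) :: sList x 1 K') []]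
      have hn : (((x :: K').length : Nat) : Int) = 1 + (K'.length : Int) := by
        simp [List.length_cons]; push_cast; ring
      rw [List.nil_append, hn, pvGroups K' x 0 1 le_rfl, bGroups_cons]
      norm_num

-- ===== A-side: the stateful loop computes emitR of the run groups =====

-- main invariant for k ≥ 1: A's loop state vs the pending group (κ, ccB)
theorem pvMain (k : Int) (hk : 1 ≤ k) (rest : List String) :
    ∀ (κ : Option String) (prev : String) (ccA ccB : Int)
      (vp : List (String × Int)) (i : Int), 1 ≤ i →
      ((∃ p, κ = some p ∧ prev = p ∧ ((prev.length : Int) = k ∧ ccA = ccB)) ∨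
       (κ = none ∧ (prev.length : Int) < k ∧ ccA = 1)) →
      aFinal k (rest.foldl (aStep k) (vp, ccA, prev, i)) =
        vp ++ emitR k (bRun κ ccB (rest.map (bKey k))) := by
  induction rest with
  | nil =>
      intro κ prev ccA ccB vp i hi hinv
      rcases hinv with ⟨p, hκ, hp, hlen, hcc⟩ | ⟨hκ, hlen, hcc⟩
      · subst hκ; subst hp; subst hcc
        simp [aFinal, bRun, emitR, pvLenEq, hlen]
      · subst hκ; subst hcc
        simp [aFinal, bRun, emitR, pvLenEq]
        intro h
        omega
  | cons s rest ih =>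
      intro κ prev ccA ccB vp i hi hinv
      have hi0 : i ≠ 0 := by omega
      simp only [List.foldl_cons, List.map_cons]
      by_cases hshort : (s.length : Int) < k
      · -- key of s is none
        have hkey : bKey k s = none := by simp [bKey, pvLenEq]; omega
        rw [hkey]
        rcases hinv with ⟨p, hκ, hp, hlen, hcc⟩ | ⟨hκ, hlen, hcc⟩
        · subst hκ; subst hp; subst hcc
          have hstep : aStep k (vp, ccA, prev, i) s = (vp ++ [(prev, ccA)], 1, s, i + 1) := by
            simp [aStep, pvLenEq, hshort, hi0, hlen]
          rw [hstep]
          rw [ih none s 1 1 (vp ++ [(prev, ccA)]) (i + 1) (by omega)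
            (Or.inr ⟨rfl, hshort, rfl⟩)]
          have hne : (none : Option String) ≠ some prev := by simp
          rw [bRun_neg _ _ _ _ hne, emitR, if_pos (by rw [pvLenEq]; exact hlen)]
          simp
        · subst hκ; subst hcc
          have hstep : aStep k (vp, 1, prev, i) s = (vp, 1, s, i + 1) := by
            simp [aStep, pvLenEq, hshort]
            intro h; omega
          rw [hstep]
          rw [ih none s 1 (ccB + 1) vp (i + 1) (by omega) (Or.inr ⟨rfl, hshort, rfl⟩)]
          rw [bRun_pos _ _ _ _ rfl]
      · -- key of s is some q with len q = k
        have hsk : k ≤ PySem.Str.len s := by rw [pvLenEq]; omega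
        have hkey : bKey k s = some (PySem.Str.slice s none (some k)) := by
          simp [bKey, pvLenEq]
          omega
        set q := PySem.Str.slice s none (some k) with hq
        have hlq : (q.length : Int) = k := by
          rw [← pvLenEq]; exact pvSliceLen s k (by omega) hsk
        rw [hkey]
        rcases hinv with ⟨p, hκ, hp, hlen, hcc⟩ | ⟨hκ, hlen, hcc⟩
        · subst hκ; subst hp; subst hcc
          have hprevslice : PySem.Str.slice prev none (some k) = prev :=
            pvSliceAll prev k (by omega) (by rw [pvLenEq]; omega)
          by_cases hpq : prev = q
          · have hsq : PySem.Str.slice q none (some k) = q := hpq ▸ hprevslice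
            have hstep : aStep k (vp, ccA, prev, i) s = (vp, ccA + 1, q, i + 1) := by
              simp [aStep, pvLenEq, hshort, ← hq, hpq, hsq]
            rw [hstep]
            rw [ih (some prev) q (ccA + 1) (ccA + 1) vp (i + 1) (by omega)
              (Or.inl ⟨prev, rfl, hpq.symm, hpq ▸ hlq, rfl⟩)]
            rw [bRun_pos _ _ _ _ (by rw [hpq])]
          · have hstep : aStep k (vp, ccA, prev, i) s = (vp ++ [(prev, ccA)], 1, q, i + 1) := by
              simp [aStep, pvLenEq, hshort, hprevslice, ← hq, hpq, hi0, hlen]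
            rw [hstep]
            rw [ih (some q) q 1 1 (vp ++ [(prev, ccA)]) (i + 1) (by omega)
              (Or.inl ⟨q, rfl, rfl, hlq, rfl⟩)]
            have hne : (some q : Option String) ≠ some prev := by
              intro h
              exact hpq (Option.some.inj h).symm
            rw [bRun_neg _ _ _ _ hne, emitR, if_pos (by rw [pvLenEq]; exact hlen)]
            simp
        · subst hκ; subst hcc
          have hprevslice : PySem.Str.slice prev none (some k) = prev :=
            pvSliceAll prev k (by omega) (by rw [pvLenEq]; omega)
          have hpq : prev ≠ q := pvNeOfLenNe prev q (by rw [pvLenEq, pvLenEq]; omega)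
          have hstep : aStep k (vp, 1, prev, i) s = (vp, 1, q, i + 1) := by
            simp [aStep, pvLenEq, hshort, hprevslice, ← hq, hpq]
            intro h; omega
          rw [hstep]
          rw [ih (some q) q 1 1 vp (i + 1) (by omega) (Or.inl ⟨q, rfl, rfl, hlq, rfl⟩)]
          have hne : (some q : Option String) ≠ none := by simp
          rw [bRun_neg _ _ _ _ hne, emitR]

-- k < 0: A appends nothing
theorem pvNegA (k : Int) (hk : k < 0) (rest : List String) :
    ∀ (st : List (String × Int) × Int × String × Int),
      (rest.foldl (aStep k) st).1 = st.1 := by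
  induction rest with
  | nil => intro st; rfl
  | cons s rest ih =>
      intro st
      rw [List.foldl_cons, ih]
      have h1 : ¬ (s.length : Int) < k := by omega
      have h2 : ¬ (st.2.2.1.length : Int) = k := by omega
      simp [aStep, pvLenEq, h1, h2]
      split <;> simp

theorem pvNegB (k : Int) (hk : k < 0) (L : List (Option String × Int)) :
    emitR k L = [] := by
  induction L with
  | nil => rfl
  | cons g L ih =>
      obtain ⟨o, c⟩ := g
      cases o with
      | none => simpa [emitR] using ih
      | some p =>
          have h : ¬ PySem.Str.len p = k := by have := pvLenNonneg p; omega
          rw [emitR, if_neg h]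
          exact ih

-- k = 0 characterisations
theorem pvSliceZero (s : String) : PySem.Str.slice s none (some 0) = "" := by
  rw [← String.toList_inj, pvSliceToList s 0 le_rfl]
  simp

theorem pvZeroA (rest : List String) :
    ∀ (vp : List (String × Int)) (cc i : Int),
      rest.foldl (aStep 0) (vp, cc, "", i) = (vp, cc + (rest.length : Int), "", i + (rest.length : Int)) := by
  induction rest with
  | nil => intro vp cc i; simp
  | cons s rest ih =>
      intro vp cc i
      have h1 : ¬ PySem.Str.len s < 0 := by have := pvLenNonneg s; omega
      have hstep : aStep 0 (vp, cc, "", i) s = (vp, cc + 1, "", i + 1) := by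
        simp [aStep, h1, pvSliceZero]
      rw [List.foldl_cons, hstep, ih]
      simp only [List.length_cons, Prod.mk.injEq]
      refine ⟨by simp, by push_cast; omega, by simp, by push_cast; omega⟩

-- ===== VERDICT (by name: the statement is the Claim_ definition above) =====
theorem find_valid_pairs_spec : Claim_unchanged_find_valid_pairs := by
  intro xs k _ hD
  unfold D_find_valid_pairs at hD
  rcases lt_trichotomy k 0 with hneg | hzero | hpos
  · -- k < 0 : both return []
    rw [alt_eq, pvNegB k hneg]
    unfold find_valid_pairs aFinal
    have h2 : ¬ PySem.Str.len (xs.foldl (aStep k) ([], 1, "", 0)).2.2.1 = k := by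
      have := pvLenNonneg (xs.foldl (aStep k) ([], 1, "", 0)).2.2.1; omega
    rw [if_neg h2, pvNegA k hneg]
  · exact absurd hzero hD
  · -- k ≥ 1
    have hk : 1 ≤ k := by omega
    cases xs with
    | nil =>
        rw [alt_eq]
        unfold find_valid_pairs aFinal
        simp [bGroups, emitR, pvLenEq]
        omega
    | cons s rest =>
        rw [alt_eq]
        unfold find_valid_pairs
        rw [List.foldl_cons, List.map_cons, bGroups_cons]
        by_cases hshort : (s.length : Int) < k
        · have hkey : bKey k s = none := by simp [bKey, pvLenEq]; omega
          have hstep : aStep k ([], 1, "", 0) s = ([], 1, s, 1) := by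
            simp [aStep, pvLenEq, hshort]
          rw [hkey, hstep]
          exact pvMain k hk rest none s 1 1 [] 1 le_rfl (Or.inr ⟨rfl, hshort, rfl⟩)
        · have hsk : k ≤ PySem.Str.len s := by rw [pvLenEq]; omega
          have hkey : bKey k s = some (PySem.Str.slice s none (some k)) := by
            simp [bKey, pvLenEq]
            omega
          set q := PySem.Str.slice s none (some k) with hq
          have hlq : (q.length : Int) = k := by
            rw [← pvLenEq]; exact pvSliceLen s k (by omega) hsk
          have hemp : PySem.Str.slice "" none (some k) = "" := by
            apply pvSliceAll "" k (by omega)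
            rw [pvLenEq]; simp; omega
          have hne : ("" : String) ≠ q := by
            apply pvNeOfLenNe
            rw [pvLenEq, pvLenEq]; simp; omega
          have hstep : aStep k ([], 1, "", 0) s = ([], 1, q, 1) := by
            simp [aStep, pvLenEq, hshort, hemp, ← hq, hne]
          rw [hkey, hstep]
          exact pvMain k hk rest (some q) q 1 1 [] 1 le_rfl (Or.inl ⟨q, rfl, rfl, hlq, rfl⟩)

theorem find_valid_pairs_changed : Claim_changed_find_valid_pairs := by
  unfold Claim_changed_find_valid_pairs; decide

theorem find_valid_pairs_tight : Claim_exact_find_valid_pairs := by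
  intro xs k _ hD
  unfold D_find_valid_pairs at hD
  subst hD
  have hlen0 : PySem.Str.len "" = 0 := by rw [pvLenEq]; simp
  cases xs with
  | nil =>
      rw [alt_eq]
      unfold find_valid_pairs aFinal
      simp [bGroups, emitR, hlen0]
  | cons s rest =>
      have hA : find_valid_pairs (s :: rest) 0 = [("", 1 + (((s :: rest).length : Nat) : Int))] := by
        unfold find_valid_pairs aFinal
        rw [pvZeroA (s :: rest) [] 1 0]
        simp
      have hkeys : ∀ t : String, bKey 0 t = some "" := by
        intro t
        have := pvLenNonneg t
        simp [bKey, pvSliceZero]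
      have hB : find_valid_pairs_alt (s :: rest) 0 = [("", 1 + ((rest.length : Nat) : Int))] := by
        rw [alt_eq, List.map_cons, hkeys s, bGroups_cons,
          bRun_const (rest.map (bKey 0)) (some "") 1 (by intro y hy; simp at hy; obtain ⟨t, _, ht⟩ := hy; rw [← ht, hkeys t]),
          emitR, if_pos hlen0, emitR]
        simp
      rw [hA, hB]
      intro h
      simp at h
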